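-- pv_equiv track=rewrite | github.com/zhaohaozhe86-arch/G1-MotionFlow | dataprocess/holomotion/src/algo/ppo.py | _organize_training_data
-- ===== SOURCE A (Python) =====
-- def _organize_training_data(training_data):
--     """Organize training data into logical groups for better console display."""
--     # Define priority order for key display
--     priority_keys = [
--         # Core training info (highest priority)
--         "Learning Iteration",
--         "FPS",
--         "Collection Time",
--         "Learning Time",
--         "",  # separator
--         # Episode statistics
--         "Mean Episode Reward",
--         "Mean Episode Length",
--         "",  # separator
--         # Model metrics
--         "Mean Action Noise Std",
--         "Actor Learning Rate",
--         "Critic Learning Rate",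
--         "",  # separator
--     ]
--
--     # Create organized list
--     organized_data = []
--     used_keys = set()
--
--     # Helper function to add section header
--     def add_section_header(title):
--         organized_data.append([f"=== {title.upper()} ===", "======"])
--
--     # Add priority keys first
--     current_section = None
--     for key in priority_keys:
--         if key == "":  # section break
--             current_section = None
--         elif key in training_data:
--             # Add section header for performance metrics
--             if current_section != "training" and key in [
--                 "Learning Iteration",
--                 "FPS",
--                 "Collection Time",
--                 "Learning Time",
--             ]:
--                 add_section_header("Performance")
--                 current_section = "training"
--             # Add section header for episode stats
--             elif current_section != "episode" and key in [
--                 "Mean Episode Reward",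
--                 "Mean Episode Length",
--             ]:
--                 add_section_header("Episode Statistics")
--                 current_section = "episode"
--             # Add section header for model metrics
--             elif current_section != "model" and key in [
--                 "Mean Action Noise Std",
--                 "Actor Learning Rate",
--                 "Critic Learning Rate",
--             ]:
--                 add_section_header("Model")
--                 current_section = "model"
--
--             organized_data.append([key, training_data[key]])
--             used_keys.add(key)
--
--     loss_keys = sorted(
--         [
--             k
--             for k in training_data.keys()
--             if k in ["value_function", "surrogate", "entropy"]
--             and k not in used_keys
--         ]
--     )
--     if loss_keys:
--         add_section_header("Loss")
--         for key in loss_keys: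
--             display_key = f"Loss/{key}"
--             organized_data.append([display_key, training_data[key]])
--             used_keys.add(key)
--
--     remaining_keys = sorted(
--         [k for k in training_data.keys() if k not in used_keys]
--     )
--     if remaining_keys:
--         add_section_header("Other Metrics")
--         for key in remaining_keys:
--             organized_data.append([key, training_data[key]])
--
--     return organized_data
-- ===== SOURCE B (Python) =====
-- _GROUPS = [
--     ("Performance", ["Learning Iteration", "FPS", "Collection Time", "Learning Time"]),
--     ("Episode Statistics", ["Mean Episode Reward", "Mean Episode Length"]),
--     ("Model", ["Mean Action Noise Std", "Actor Learning Rate", "Critic Learning Rate"]),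
-- ]
-- _LOSS_KEYS = ["entropy", "surrogate", "value_function"]  # already in sorted order
--
--
-- def _organize_training_data(training_data):
--     """Organize training data into logical groups for better console display."""
--     organized_data = []
--
--     # Named sections, driven by the group table (no section state machine).
--     for title, keys in _GROUPS:
--         present = [k for k in keys if k in training_data]
--         if present:
--             organized_data.append([f"=== {title.upper()} ===", "======"])
--             for k in present:
--                 organized_data.append([k, training_data[k]])
--
--     # Loss section: _LOSS_KEYS is already sorted, so filtering keeps sorted order.
--     loss_present = [k for k in _LOSS_KEYS if k in training_data]
--     if loss_present:
--         organized_data.append(["=== LOSS ===", "======"])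
--         for k in loss_present:
--             organized_data.append([f"Loss/{k}", training_data[k]])
--
--     # Everything else, alphabetically.
--     known = {k for _, ks in _GROUPS for k in ks} | set(_LOSS_KEYS)
--     remaining = sorted(k for k in training_data if k not in known)
--     if remaining:
--         organized_data.append(["=== OTHER METRICS ===", "======"])
--         for k in remaining:
--             organized_data.append([k, training_data[k]])
--
--     return organized_data
-- ===== Notes on version B (the rewrite author's own statement) =====
-- stated objective: simpler
-- what changed: Replaces the priority-list state machine (separator sentinels and current_section tracking) with a data-driven table of (title, keys) groups, emits the loss section by filtering an already-sorted constant list instead of sorting, and computes remaining keys from a constant known-key set instead of a mutated used_keys set.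
import Mathlib
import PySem

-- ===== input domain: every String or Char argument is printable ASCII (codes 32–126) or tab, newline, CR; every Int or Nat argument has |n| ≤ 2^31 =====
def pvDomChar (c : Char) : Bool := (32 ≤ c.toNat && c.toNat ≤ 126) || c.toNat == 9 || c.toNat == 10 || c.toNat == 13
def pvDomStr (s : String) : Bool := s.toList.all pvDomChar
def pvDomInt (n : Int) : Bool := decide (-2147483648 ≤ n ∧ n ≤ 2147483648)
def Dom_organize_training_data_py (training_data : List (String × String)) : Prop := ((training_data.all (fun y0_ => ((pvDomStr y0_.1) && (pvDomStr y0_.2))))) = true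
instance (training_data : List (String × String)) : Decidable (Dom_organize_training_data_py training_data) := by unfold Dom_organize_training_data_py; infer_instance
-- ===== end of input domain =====

-- B replaces A's priority-list state machine by a data-driven group table, filters a constant
-- sorted loss list instead of sorting, and uses a constant known-key set instead of the mutated
-- used_keys set; objective: simpler.

-- ===== PORT A =====
-- f"=== {title.upper()} ===" header row (add_section_header appends this)
def pvHeaderA (title : String) : List String :=
  ["=== " ++ PySem.Str.upper title ++ " ===", "======"]

def pvPerfKeys : List String := ["Learning Iteration", "FPS", "Collection Time", "Learning Time"]
def pvEpKeys : List String := ["Mean Episode Reward", "Mean Episode Length"]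
def pvModelKeys : List String := ["Mean Action Noise Std", "Actor Learning Rate", "Critic Learning Rate"]

def pvPriorityKeys : List String :=
  ["Learning Iteration", "FPS", "Collection Time", "Learning Time", "",
   "Mean Episode Reward", "Mean Episode Length", "",
   "Mean Action Noise Std", "Actor Learning Rate", "Critic Learning Rate", ""]

-- one iteration of A's priority loop; state = (organized_data, used_keys, current_section)
def pvStepA (d : PySem.Dict String String)
    (st : List (List String) × PySem.Set String × Option String) (key : String) :
    List (List String) × PySem.Set String × Option String :=
  if key = "" then (st.1, st.2.1, none)
  else if d.contains key then
    let hc : List (List String) × Option String :=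
      if st.2.2 ≠ some "training" ∧ key ∈ pvPerfKeys then
        (st.1 ++ [pvHeaderA "Performance"], some "training")
      else if st.2.2 ≠ some "episode" ∧ key ∈ pvEpKeys then
        (st.1 ++ [pvHeaderA "Episode Statistics"], some "episode")
      else if st.2.2 ≠ some "model" ∧ key ∈ pvModelKeys then
        (st.1 ++ [pvHeaderA "Model"], some "model")
      else (st.1, st.2.2)
    -- training_data[key] under the 'key in training_data' guard: getD is exact here
    (hc.1 ++ [[key, d.getD key ""]], PySem.Set.add st.2.1 key, hc.2)
  else (st.1, st.2.1, st.2.2)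

def organize_training_data_py (training_data : List (String × String)) : List (List String) :=
  let d := PySem.Dict.mk training_data
  let st := pvPriorityKeys.foldl (pvStepA d) ([], PySem.Set.empty, none)
  let loss_keys := PySem.List.sorted
      (d.keys.filter (fun k =>
        decide (k ∈ (["value_function", "surrogate", "entropy"] : List String)) &&
        !(PySem.Set.contains st.2.1 k)))
      (fun x => x)
  let organized :=
    if loss_keys ≠ [] then
      st.1 ++ [pvHeaderA "Loss"] ++ loss_keys.map (fun k => ["Loss/" ++ k, d.getD k ""])
    else st.1
  let used := if loss_keys ≠ [] then loss_keys.foldl PySem.Set.add st.2.1 else st.2.1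
  let remaining := PySem.List.sorted (d.keys.filter (fun k => !(PySem.Set.contains used k))) (fun x => x)
  if remaining ≠ [] then
    organized ++ [pvHeaderA "Other Metrics"] ++ remaining.map (fun k => [k, d.getD k ""])
  else organized

-- ===== PORT B =====
def pvHeaderB (title : String) : List String :=
  ["=== " ++ PySem.Str.upper title ++ " ===", "======"]

def pvGroups : List (String × List String) :=
  [("Performance", ["Learning Iteration", "FPS", "Collection Time", "Learning Time"]),
   ("Episode Statistics", ["Mean Episode Reward", "Mean Episode Length"]),
   ("Model", ["Mean Action Noise Std", "Actor Learning Rate", "Critic Learning Rate"])]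

def pvLossKeys : List String := ["entropy", "surrogate", "value_function"]  -- already sorted

def organize_training_data_py_alt (training_data : List (String × String)) : List (List String) :=
  let d := PySem.Dict.mk training_data
  let out := pvGroups.foldl (fun acc g =>
      let present := g.2.filter (fun k => d.contains k)
      if present = [] then acc
      else acc ++ [pvHeaderB g.1] ++ present.map (fun k => [k, d.getD k ""])) []
  let lossPresent := pvLossKeys.filter (fun k => d.contains k)
  let out := if lossPresent = [] then out
    else out ++ [pvHeaderB "Loss"] ++ lossPresent.map (fun k => ["Loss/" ++ k, d.getD k ""])
  -- known = {k for _, ks in _GROUPS for k in ks} | set(_LOSS_KEYS): a set used only for membership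
  let known : PySem.Set String :=
    PySem.Set.ofList (pvGroups.foldr (fun g acc => g.2 ++ acc) [] ++ pvLossKeys)
  let remaining := PySem.List.sorted (d.keys.filter (fun k => !(PySem.Set.contains known k))) (fun x => x)
  if remaining = [] then out
  else out ++ [pvHeaderB "Other Metrics"] ++ remaining.map (fun k => [k, d.getD k ""])

-- ===== PRECONDITION & SPEC =====
-- Pre_ excludes association lists with duplicate keys: A's parameter is a Python dict, which can
-- never hold duplicate keys, so such lists encode no actual input of A.
def Pre_organize_training_data_py (training_data : List (String × String)) : Prop :=
  (training_data.map Prod.fst).Nodup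
instance (training_data : List (String × String)) : Decidable (Pre_organize_training_data_py training_data) := by unfold Pre_organize_training_data_py; infer_instance

def pvWitness_organize_training_data_py : (List (String × String)) :=
  [("FPS", "1024"), ("entropy", "0.01"), ("alpha", "3")]

def Spec_organize_training_data_py (training_data : List (String × String)) (out : List (List String)) : Prop := out = organize_training_data_py_alt training_data
instance (training_data : List (String × String)) (out : List (List String)) : Decidable (Spec_organize_training_data_py training_data out) := by unfold Spec_organize_training_data_py; infer_instance

-- ===== CLAIM (what is proved, stated in full; the proofs are below) =====
def Claim_equal_organize_training_data_py : Prop := ∀ (training_data : List (String × String)), Dom_organize_training_data_py training_data → Pre_organize_training_data_py training_data → Spec_organize_training_data_py training_data (organize_training_data_py training_data)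

-- ===== LEMMAS AND PROOFS =====
def pvGroupOut (d : PySem.Dict String String) (title : String) (ks : List String) : List (List String) :=
  let present := ks.filter (fun k => d.contains k)
  if present = [] then [] else pvHeaderA title :: present.map (fun k => [k, d.getD k ""])

lemma pvSegPerf (d : PySem.Dict String String) (acc : List (List String)) (used : PySem.Set String) :
    List.foldl (pvStepA d) (acc, used, (none : Option String))
      ["Learning Iteration", "FPS", "Collection Time", "Learning Time", ""]
    = (acc ++ pvGroupOut d "Performance" pvPerfKeys,
       PySem.Set.update used (pvPerfKeys.filter (fun k => d.contains k)), none) := by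
  by_cases h1 : d.contains "Learning Iteration" = true <;>
  by_cases h2 : d.contains "FPS" = true <;>
  by_cases h3 : d.contains "Collection Time" = true <;>
  by_cases h4 : d.contains "Learning Time" = true <;>
  simp [pvStepA, pvGroupOut, pvPerfKeys, pvEpKeys, pvModelKeys, PySem.Set.update,
        List.filter, h1, h2, h3, h4, List.append_assoc]
lemma pvSegEp (d : PySem.Dict String String) (acc : List (List String)) (used : PySem.Set String) :
    List.foldl (pvStepA d) (acc, used, (none : Option String))
      ["Mean Episode Reward", "Mean Episode Length", ""]
    = (acc ++ pvGroupOut d "Episode Statistics" pvEpKeys,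
       PySem.Set.update used (pvEpKeys.filter (fun k => d.contains k)), none) := by
  by_cases h1 : d.contains "Mean Episode Reward" = true <;>
  by_cases h2 : d.contains "Mean Episode Length" = true <;>
  simp [pvStepA, pvGroupOut, pvPerfKeys, pvEpKeys, pvModelKeys, PySem.Set.update,
        List.filter, h1, h2, List.append_assoc]

lemma pvSegModel (d : PySem.Dict String String) (acc : List (List String)) (used : PySem.Set String) :
    List.foldl (pvStepA d) (acc, used, (none : Option String))
      ["Mean Action Noise Std", "Actor Learning Rate", "Critic Learning Rate", ""]
    = (acc ++ pvGroupOut d "Model" pvModelKeys,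
       PySem.Set.update used (pvModelKeys.filter (fun k => d.contains k)), none) := by
  by_cases h1 : d.contains "Mean Action Noise Std" = true <;>
  by_cases h2 : d.contains "Actor Learning Rate" = true <;>
  by_cases h3 : d.contains "Critic Learning Rate" = true <;>
  simp [pvStepA, pvGroupOut, pvPerfKeys, pvEpKeys, pvModelKeys, PySem.Set.update,
        List.filter, h1, h2, h3, List.append_assoc]

def pvUsedA (d : PySem.Dict String String) : PySem.Set String :=
  PySem.Set.update (PySem.Set.update (PySem.Set.update PySem.Set.empty
    (pvPerfKeys.filter (fun k => d.contains k)))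
    (pvEpKeys.filter (fun k => d.contains k)))
    (pvModelKeys.filter (fun k => d.contains k))

lemma pvHeadA (d : PySem.Dict String String) :
    List.foldl (pvStepA d) ([], PySem.Set.empty, (none : Option String)) pvPriorityKeys
    = (pvGroupOut d "Performance" pvPerfKeys ++ pvGroupOut d "Episode Statistics" pvEpKeys
         ++ pvGroupOut d "Model" pvModelKeys,
       pvUsedA d, none) := by
  rw [show pvPriorityKeys
      = ["Learning Iteration", "FPS", "Collection Time", "Learning Time", ""]
        ++ (["Mean Episode Reward", "Mean Episode Length", ""]
        ++ ["Mean Action Noise Std", "Actor Learning Rate", "Critic Learning Rate", ""]) from rfl]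
  rw [List.foldl_append, List.foldl_append, pvSegPerf, pvSegEp, pvSegModel]
  simp [pvUsedA, List.append_assoc]
lemma pvHeadB (d : PySem.Dict String String) :
    pvGroups.foldl (fun acc g =>
      if g.2.filter (fun k => d.contains k) = [] then acc
      else acc ++ [pvHeaderB g.1]
        ++ (g.2.filter (fun k => d.contains k)).map (fun k => [k, d.getD k ""])) []
    = pvGroupOut d "Performance" pvPerfKeys ++ pvGroupOut d "Episode Statistics" pvEpKeys
        ++ pvGroupOut d "Model" pvModelKeys := by
  rw [show pvGroups = [("Performance", pvPerfKeys), ("Episode Statistics", pvEpKeys),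
      ("Model", pvModelKeys)] from rfl]
  simp only [List.foldl]
  by_cases e1 : pvPerfKeys.filter (fun k => d.contains k) = [] <;>
  by_cases e2 : pvEpKeys.filter (fun k => d.contains k) = [] <;>
  by_cases e3 : pvModelKeys.filter (fun k => d.contains k) = [] <;>
  simp [pvGroupOut, pvHeaderB, pvHeaderA, e1, e2, e3, List.append_assoc]

lemma pvMemUsedA (d : PySem.Dict String String) (x : String) :
    x ∈ pvUsedA d ↔
      (x ∈ pvPerfKeys ∨ x ∈ pvEpKeys ∨ x ∈ pvModelKeys) ∧ d.contains x = true := by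
  simp [pvUsedA, PySem.Set.mem_update, PySem.Set.empty, List.mem_filter]
  tauto
lemma pvLossDrop (d : PySem.Dict String String) :
    d.keys.filter (fun k =>
        decide (k ∈ (["value_function", "surrogate", "entropy"] : List String)) &&
        !(PySem.Set.contains (pvUsedA d) k))
    = d.keys.filter (fun k =>
        decide (k ∈ (["value_function", "surrogate", "entropy"] : List String))) := by
  apply List.filter_congr
  intro a _
  by_cases hm : a ∈ (["value_function", "surrogate", "entropy"] : List String)
  · have hu : a ∉ pvUsedA d := by
      intro hmem
      rcases (pvMemUsedA d a).mp hmem with ⟨h9, -⟩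
      simp [pvPerfKeys, pvEpKeys, pvModelKeys] at h9
      simp only [List.mem_cons, List.not_mem_nil, or_false] at hm
      rcases hm with rfl | rfl | rfl <;> simp_all
    simp [hm, PySem.Set.contains, hu]
  · simp [hm]

lemma pvLossEq (d : PySem.Dict String String) (hn : d.keys.Nodup) :
    PySem.List.sorted (d.keys.filter (fun k =>
        decide (k ∈ (["value_function", "surrogate", "entropy"] : List String)) &&
        !(PySem.Set.contains (pvUsedA d) k))) (fun x => x)
    = pvLossKeys.filter (fun k => d.contains k) := by
  rw [pvLossDrop]
  apply PySem.List.sorted_eq_of_perm_of_pairwise_lt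
  · rw [List.perm_ext_iff_of_nodup ((by decide : pvLossKeys.Nodup).filter _) (hn.filter _)]
    intro a
    simp only [List.mem_filter, PySem.Dict.contains_iff_mem_keys, pvLossKeys,
      List.mem_cons, List.not_mem_nil, decide_eq_true_eq]
    tauto
  · refine List.Pairwise.filter _ ?_
    simp only [pvLossKeys, List.pairwise_cons, List.mem_cons, List.not_mem_nil, or_false,
      forall_eq_or_imp, forall_eq, String.lt_iff_toList_lt]
    exact ⟨⟨by decide, by decide⟩, by decide, fun a' h => h.elim, List.Pairwise.nil⟩
lemma pvHeaderB_eq (t : String) : pvHeaderB t = pvHeaderA t := rfl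

lemma pvRemCongr (d : PySem.Dict String String) :
    d.keys.filter (fun k => !(PySem.Set.contains
        ((pvLossKeys.filter (fun k => d.contains k)).foldl PySem.Set.add (pvUsedA d)) k))
    = d.keys.filter (fun k => !(PySem.Set.contains
        (PySem.Set.ofList (pvGroups.foldr (fun g acc => g.2 ++ acc) [] ++ pvLossKeys)) k)) := by
  apply List.filter_congr
  intro a ha
  have hca : d.contains a = true := (PySem.Dict.contains_iff_mem_keys d a).mpr ha
  have hiff : (a ∈ (pvLossKeys.filter (fun k => d.contains k)).foldl PySem.Set.add (pvUsedA d))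
      ↔ a ∈ PySem.Set.ofList (pvGroups.foldr (fun g acc => g.2 ++ acc) [] ++ pvLossKeys) := by
    rw [show (pvLossKeys.filter (fun k => d.contains k)).foldl PySem.Set.add (pvUsedA d)
        = PySem.Set.update (pvUsedA d) (pvLossKeys.filter (fun k => d.contains k)) from rfl]
    simp [PySem.Set.mem_update, PySem.Set.mem_ofList, pvMemUsedA, List.mem_filter,
      pvPerfKeys, pvEpKeys, pvModelKeys, pvLossKeys, pvGroups, hca]
    tauto
  simp [PySem.Set.contains, hiff]

lemma pvFinal (td : List (String × String)) (hpre : (td.map Prod.fst).Nodup) :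
    organize_training_data_py td = organize_training_data_py_alt td := by
  have hn : (PySem.Dict.mk td).keys.Nodup := by simpa [PySem.Dict.keys] using hpre
  unfold organize_training_data_py organize_training_data_py_alt
  simp only [pvHeadA, pvHeadB]
  simp only [pvHeaderB_eq]
  rw [pvLossEq _ hn]
  have hrem := pvRemCongr (PySem.Dict.mk td)
  by_cases hLP : pvLossKeys.filter (fun k => (PySem.Dict.mk td).contains k) = []
  · rw [hLP] at hrem
    simp only [List.foldl_nil] at hrem
    rw [hLP]
    simp only [ne_eq, List.foldl_nil, List.map_nil, reduceIte, not_true_eq_false]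
    rw [hrem]
    by_cases hr : PySem.List.sorted ((PySem.Dict.mk td).keys.filter (fun k =>
        !(PySem.Set.contains (PySem.Set.ofList
          (pvGroups.foldr (fun g acc => g.2 ++ acc) [] ++ pvLossKeys)) k))) (fun x => x) = []
    · simp only [hr, reduceIte, List.map_nil, ne_eq, not_true_eq_false]
    · simp only [hr, reduceIte, ne_eq, not_false_eq_true, ite_true, ite_false]
  · simp only [hLP, ne_eq, not_false_eq_true, reduceIte, ite_true, ite_false]
    rw [hrem]
    by_cases hr : PySem.List.sorted ((PySem.Dict.mk td).keys.filter (fun k =>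
        !(PySem.Set.contains (PySem.Set.ofList
          (pvGroups.foldr (fun g acc => g.2 ++ acc) [] ++ pvLossKeys)) k))) (fun x => x) = []
    · simp only [hr, reduceIte, List.map_nil, ne_eq, not_true_eq_false]
    · simp only [hr, reduceIte, ne_eq, not_false_eq_true, ite_true, ite_false]

-- ===== VERDICT (by name: the statement is the Claim_ definition above) =====
theorem organize_training_data_py_spec : Claim_equal_organize_training_data_py := by
  intro training_data _ hpre
  unfold Spec_organize_training_data_py
  exact pvFinal training_data hpre
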